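-- pv_equiv track=rewrite | github.com/karlosalvarado/SoulSyncCafe | soulsync-backend/calculators/feng_shui.py | calculate_kua
-- ===== SOURCE A (Python) =====
-- def calculate_kua(birth_year: int, gender: str) -> tuple:
--     y = birth_year % 100
--     total = sum(int(d) for d in str(y))
--
--     if gender.lower() == "female":
--         kua = total + 5
--     else:
--         kua = 10 - total
--
--     while kua > 9:
--         kua = sum(int(d) for d in str(kua))
--
--     group = "East" if kua in [1, 3, 4, 9] else "West"
--     return kua, group
-- ===== SOURCE B (Python) =====
-- def calculate_kua(birth_year: int, gender: str) -> tuple: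
--     y = birth_year % 100
--     total = y // 10 + y % 10
--
--     if gender.lower() == "female":
--         kua = total + 5
--     else:
--         kua = 10 - total
--
--     if kua > 9:
--         kua = (kua - 1) % 9 + 1
--
--     group = "East" if kua in {1, 3, 4, 9} else "West"
--     return kua, group
-- ===== Notes on version B (the rewrite author's own statement) =====
-- stated objective: idiomatic
-- what changed: Replaces the string-based digit sum with the arithmetic y//10 + y%10 and the while digit-sum reduction loop with the closed-form digital root (kua-1)%9+1 applied only when kua > 9.
import Mathlib
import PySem

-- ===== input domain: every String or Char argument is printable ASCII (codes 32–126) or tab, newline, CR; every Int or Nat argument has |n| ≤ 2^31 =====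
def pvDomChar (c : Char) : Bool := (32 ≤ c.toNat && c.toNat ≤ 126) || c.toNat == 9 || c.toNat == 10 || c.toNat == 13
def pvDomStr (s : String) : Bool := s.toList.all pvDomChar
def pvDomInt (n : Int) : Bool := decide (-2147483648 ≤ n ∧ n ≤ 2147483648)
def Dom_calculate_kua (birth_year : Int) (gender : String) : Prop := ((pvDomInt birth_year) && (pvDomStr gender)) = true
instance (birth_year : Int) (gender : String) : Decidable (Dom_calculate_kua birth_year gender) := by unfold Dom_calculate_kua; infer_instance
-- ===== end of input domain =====

-- B replaces the string digit sum with y // 10 + y % 10 and the while-loop reduction with the guarded digital root (kua - 1) % 9 + 1 (idiomatic, same O(1) cost).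


-- ===== PORT A =====
-- int(d) per character of str(n); exact for n >= 0 (in A, str() is only applied to 0 <= y <= 99 and kua > 9)
def pvDigitSum (n : Int) : Int :=
  ((PySem.Int.toStr n).toList.map (fun d => (PySem.Int.ofStr? (String.ofList [d])).getD 0)).sum

-- `while kua > 9: kua = sum(int(d) for d in str(kua))`; fuel = kua.natAbs only makes the loop total
def pvReduce (kua : Int) : Nat → Int
  | 0 => kua
  | fuel + 1 => if kua > 9 then pvReduce (pvDigitSum kua) fuel else kua

def calculate_kua (birth_year : Int) (gender : String) : Int × String :=
  let y := PySem.Int.mod birth_year 100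
  let total := pvDigitSum y
  let kua := if PySem.Str.lower gender == "female" then total + 5 else 10 - total
  let kua := pvReduce kua kua.natAbs
  let group := if [(1 : Int), 3, 4, 9].contains kua then "East" else "West"
  (kua, group)

-- ===== PORT B =====
def calculate_kua_alt (birth_year : Int) (gender : String) : Int × String :=
  let y := PySem.Int.mod birth_year 100
  let total := PySem.Int.floordiv y 10 + PySem.Int.mod y 10
  let kua := if PySem.Str.lower gender == "female" then total + 5 else 10 - total
  let kua := if kua > 9 then PySem.Int.mod (kua - 1) 9 + 1 else kua
  let group := if [(1 : Int), 3, 4, 9].contains kua then "East" else "West"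
  (kua, group)

-- ===== PRECONDITION & SPEC =====
def Spec_calculate_kua (birth_year : Int) (gender : String) (out : Int × String) : Prop := out = calculate_kua_alt birth_year gender
instance (birth_year : Int) (gender : String) (out : Int × String) : Decidable (Spec_calculate_kua birth_year gender out) := by unfold Spec_calculate_kua; infer_instance

-- ===== CLAIM (what is proved, stated in full; the proofs are below) =====
def Claim_equal_calculate_kua : Prop := ∀ (birth_year : Int) (gender : String), Dom_calculate_kua birth_year gender → Spec_calculate_kua birth_year gender (calculate_kua birth_year gender)

-- ===== LEMMAS AND PROOFS =====
-- the whole computation after y depends only on y ∈ [0, 100) and the gender test; checked by decide over Fin 100 × Bool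
theorem pv_core : ∀ (n : Fin 100) (b : Bool),
    (let total := pvDigitSum (n : Int)
     let kua := if b then total + 5 else 10 - total
     let kua := pvReduce kua kua.natAbs
     ((kua, if [(1 : Int), 3, 4, 9].contains kua then "East" else "West") : Int × String))
    = (let total := PySem.Int.floordiv (n : Int) 10 + PySem.Int.mod (n : Int) 10
       let kua := if b then total + 5 else 10 - total
       let kua := if kua > 9 then PySem.Int.mod (kua - 1) 9 + 1 else kua
       (kua, if [(1 : Int), 3, 4, 9].contains kua then "East" else "West")) := by
  decide

-- ===== VERDICT (by name: the statement is the Claim_ definition above) =====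
theorem calculate_kua_spec : Claim_equal_calculate_kua := by
  intro birth_year gender _
  unfold Spec_calculate_kua calculate_kua calculate_kua_alt
  have h0 : 0 ≤ PySem.Int.mod birth_year 100 := PySem.Int.mod_nonneg birth_year (by norm_num)
  have h1 : PySem.Int.mod birth_year 100 < 100 := PySem.Int.mod_lt birth_year (by norm_num)
  have hn : PySem.Int.mod birth_year 100 = ((⟨(PySem.Int.mod birth_year 100).toNat, by omega⟩ : Fin 100) : Int) := by
    simp only [Fin.val_mk]; omega
  rw [hn]
  exact pv_core _ (PySem.Str.lower gender == "female")
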